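-- pv_equiv track=rewrite | github.com/hlinh-uet/Unified-Debugging | core/utils.py | _append_quoted_literal
-- ===== SOURCE A (Python) =====
-- def _append_quoted_literal(source: str, start: int, out: list) -> int:
--     """Append a quoted C/C++ string/char literal and return the next index."""
--     quote = source[start]
--     i = start
--     n = len(source)
--
--     out.append(source[i])
--     i += 1
--
--     while i < n:
--         c = source[i]
--         out.append(c)
--         i += 1
--
--         if c == '\\' and i < n:
--             out.append(source[i])
--             i += 1
--             continue
--
--         if c == quote:
--             break
--
--     return i
-- ===== SOURCE B (Python) =====
-- def _append_quoted_literal(source: str, start: int, out: list) -> int: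
--     """Find the end of the literal by jumping between backslashes/quotes with
--     str.find, then bulk-copy the matched span in one slice."""
--     quote = source[start]
--     n = len(source)
--     i = start + 1
--     while i < n:
--         jb = source.find('\\', i)
--         jq = source.find(quote, i)
--         if jb != -1 and (jq == -1 or jb <= jq):
--             i = jb + 2                  # escape: skip the backslash and the next char
--         elif jq != -1:
--             i = jq + 1                  # unescaped closing quote
--             break
--         else:
--             i = n                       # unterminated literal
--             break
--     end = min(i, n)
--     out.extend(source[start:end])
--     return end
-- ===== Notes on version B (the rewrite author's own statement) =====
-- stated objective: alternative
-- what changed: Instead of A's per-character while-loop that appends each char and re-checks the escape/quote branches for every character, B jumps directly between the next backslash and next quote positions using str.find, then copies the whole matched span with one slice and returns the clamped end index.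
-- outside the precondition, e.g. on _append_quoted_literal('ab"', -2, []): A returns 2, B returns 3
import Mathlib
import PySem

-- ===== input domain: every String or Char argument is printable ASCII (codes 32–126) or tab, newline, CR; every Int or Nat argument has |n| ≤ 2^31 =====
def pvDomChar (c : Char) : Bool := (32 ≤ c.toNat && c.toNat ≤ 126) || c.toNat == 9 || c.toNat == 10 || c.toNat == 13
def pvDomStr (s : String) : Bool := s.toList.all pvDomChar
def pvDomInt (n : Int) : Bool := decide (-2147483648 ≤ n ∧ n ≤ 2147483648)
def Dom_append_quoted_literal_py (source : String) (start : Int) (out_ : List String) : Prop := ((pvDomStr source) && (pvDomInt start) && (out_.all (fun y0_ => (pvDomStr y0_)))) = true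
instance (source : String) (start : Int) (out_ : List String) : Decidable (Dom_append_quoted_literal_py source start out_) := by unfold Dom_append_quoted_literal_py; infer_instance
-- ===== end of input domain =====

-- B finds the end of the literal by jumping between backslash/quote positions with str.find
-- and copies the span with one slice, instead of A's per-character loop with per-char appends.
-- Equivalence is about the RETURN value (the Lean signature returns only the index); on Pre_
-- both Pythons also extend `out` with the same characters.

-- ===== PORT A =====
-- the while-loop of A as structural recursion on the remaining length; `i` starts at start+1
-- (the opening quote at `start` is appended before the loop and does not affect the result index)
def pvLoopA (s : List Char) (q : Char) (i : Nat) : Nat :=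
  if _h : i < s.length then
    if s.getD i ' ' = '\\' ∧ i + 1 < s.length then pvLoopA s q (i + 2)
    else if s.getD i ' ' = q then i + 1
    else pvLoopA s q (i + 1)
  else i
termination_by s.length - i

-- `source[start]` is PySem.Str.pyGet? (none = IndexError, excluded by Pre_); on Pre_ start >= 0,
-- so the loop index start+1 is start.toNat + 1.
def append_quoted_literal_py (source : String) (start : Int) (out_ : List String) : Int :=
  match PySem.Str.pyGet? source start with
  | none => 0
  | some q => ((pvLoopA source.toList q (start.toNat + 1) : Nat) : Int)

-- ===== PORT B =====
-- Source B's while-loop; source.find(c, i) is PySem.Chars.findFrom on source.toList (Str.findFrom_eq);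
-- Source B's locals jb/jq are written inline here
def pvLoopB (s : List Char) (q : Char) (i : Nat) : Nat :=
  if hin : i < s.length then
    if hb : PySem.Chars.findFrom s ['\\'] (i : Int) none ≠ -1 ∧
        (PySem.Chars.findFrom s [q] (i : Int) none = -1 ∨
         PySem.Chars.findFrom s ['\\'] (i : Int) none ≤ PySem.Chars.findFrom s [q] (i : Int) none) then
      pvLoopB s q ((PySem.Chars.findFrom s ['\\'] (i : Int) none).toNat + 2)
    else if PySem.Chars.findFrom s [q] (i : Int) none ≠ -1 then
      (PySem.Chars.findFrom s [q] (i : Int) none).toNat + 1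
    else s.length
  else i
termination_by s.length - i
decreasing_by
  have hk : i ≤ s.length := Nat.le_of_lt hin
  have h1 := PySem.Chars.findFrom_natCast s ['\\'] i hk
  have h2 : PySem.Chars.findFrom s ['\\'] (i : Int) none ≠ -1 := hb.1
  rw [h1] at h2 ⊢
  split at h2
  · exact absurd rfl h2
  · rename_i hf
    have hge : (0:Int) ≤ PySem.Chars.find (s.drop i) ['\\'] := by
      have := PySem.Chars.neg_one_le_find (s.drop i) ['\\']
      omega
    split
    · rename_i h'; exact absurd h' hf
    · omega

def append_quoted_literal_py_alt (source : String) (start : Int) (out_ : List String) : Int :=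
  match PySem.Str.pyGet? source start with
  | none => 0
  | some q => ((min (pvLoopB source.toList q (start.toNat + 1)) source.toList.length : Nat) : Int)

-- ===== PRECONDITION & SPEC =====
-- Pre_ excludes start out of range (A raises IndexError) and negative in-range start, which is
-- outside the function's natural domain (start must index the opening quote): there A returns a
-- value produced by accidental negative-index wraparound (it scans a rotated view of the string)
-- while B's slice-bound str.find reads different clamped bounds, so neither value is specified.
def Pre_append_quoted_literal_py (source : String) (start : Int) (out_ : List String) : Prop :=
  0 ≤ start ∧ start < (source.length : Int)
instance (source : String) (start : Int) (out_ : List String) : Decidable (Pre_append_quoted_literal_py source start out_) := by unfold Pre_append_quoted_literal_py; infer_instance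

def pvWitness_append_quoted_literal_py : String × Int × List String := ("x = \"a\\\"b\";", 4, [])

def Spec_append_quoted_literal_py (source : String) (start : Int) (out_ : List String) (out : Int) : Prop := out = append_quoted_literal_py_alt source start out_
instance (source : String) (start : Int) (out_ : List String) (out : Int) : Decidable (Spec_append_quoted_literal_py source start out_ out) := by unfold Spec_append_quoted_literal_py; infer_instance

-- ===== CLAIM (what is proved, stated in full; the proofs are below) =====
def Claim_equal_append_quoted_literal_py : Prop := ∀ (source : String) (start : Int) (out_ : List String), Dom_append_quoted_literal_py source start out_ → Pre_append_quoted_literal_py source start out_ → Spec_append_quoted_literal_py source start out_ (append_quoted_literal_py source start out_)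

-- ===== LEMMAS AND PROOFS =====

theorem pvSingle_prefix (c : Char) (s : List Char) (j : Nat) :
    [c] <+: s.drop j ↔ s[j]? = some c := by
  rw [← List.head?_drop]
  constructor
  · rintro ⟨t', ht⟩; rw [← ht]; rfl
  · intro h
    cases hd : s.drop j with
    | nil => rw [hd] at h; simp at h
    | cons a t => rw [hd] at h; simp at h; subst h; exact ⟨t, rfl⟩
theorem pvSingle_infix (c : Char) (t : List Char) :
    [c] <:+: t ↔ c ∈ t := by
  constructor
  · intro h; exact h.mem (List.mem_singleton_self c)
  · intro h
    obtain ⟨l1, l2, rfl⟩ := List.append_of_mem h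
    exact ⟨l1, l2, by simp⟩
theorem pvMem_drop (c : Char) (s : List Char) (i : Nat) :
    c ∈ s.drop i ↔ ∃ k, i ≤ k ∧ k < s.length ∧ s[k]? = some c := by
  rw [List.mem_iff_getElem?]
  constructor
  · rintro ⟨j, hj⟩
    rw [List.getElem?_drop] at hj
    refine ⟨i + j, by omega, ?_, hj⟩
    obtain ⟨hlt, -⟩ := List.getElem?_eq_some_iff.mp hj
    omega
  · rintro ⟨k, hik, hk, hc⟩
    exact ⟨k - i, by rw [List.getElem?_drop]; rw [show i + (k - i) = k by omega]; exact hc⟩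
theorem pvFF_none (s : List Char) (c : Char) (i : Nat) (hi : i ≤ s.length) :
    PySem.Chars.findFrom s [c] (i : Int) none = -1 ↔ ∀ k, i ≤ k → k < s.length → s[k]? ≠ some c := by
  rw [PySem.Chars.findFrom_natCast_eq_neg_one_iff s [c] i hi, pvSingle_infix, pvMem_drop]
  push Not
  constructor
  · intro h k h1 h2; exact h k h1 h2
  · intro h k h1 h2; exact h k h1 h2
theorem pvFF_some (s : List Char) (c : Char) (i : Nat) (hi : i ≤ s.length)
    (h : PySem.Chars.findFrom s [c] (i : Int) none ≠ -1) :
    i ≤ (PySem.Chars.findFrom s [c] (i : Int) none).toNat ∧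
    (PySem.Chars.findFrom s [c] (i : Int) none).toNat < s.length ∧
    s[(PySem.Chars.findFrom s [c] (i : Int) none).toNat]? = some c ∧
    ∀ k, i ≤ k → k < (PySem.Chars.findFrom s [c] (i : Int) none).toNat → s[k]? ≠ some c := by
  obtain ⟨hle, hpre, hfirst⟩ := PySem.Chars.findFrom_natCast_spec s [c] i hi h
  rw [pvSingle_prefix] at hpre
  have hlt : (PySem.Chars.findFrom s [c] (i : Int) none).toNat < s.length := by
    obtain ⟨hlt, -⟩ := List.getElem?_eq_some_iff.mp hpre
    omega
  refine ⟨by omega, hlt, hpre, ?_⟩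
  intro k h1 h2 hc
  exact hfirst k h1 h2 ((pvSingle_prefix c s k).mpr hc)

theorem pvGetD_eq (s : List Char) (i : Nat) (h : i < s.length) :
    s[i]? = some (s.getD i ' ') := by
  rw [List.getD_eq_getElem s ' ' h, List.getElem?_eq_getElem h]

theorem pvLoopA_gap (s : List Char) (q : Char) :
    ∀ (d i j : Nat), j - i = d → i ≤ j → j ≤ s.length →
    (∀ k, i ≤ k → k < j → s[k]? ≠ some '\\' ∧ s[k]? ≠ some q) →
    pvLoopA s q i = pvLoopA s q j := by
  intro d
  induction d with
  | zero =>
    intro i j hd hij _ _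
    have : i = j := by omega
    rw [this]
  | succ n ih =>
    intro i j hd hij hj h
    have hin : i < s.length := by omega
    have hc := h i (le_refl i) (by omega)
    have hgd := pvGetD_eq s i hin
    have h1 : ¬ (s.getD i ' ' = '\\' ∧ i + 1 < s.length) := by
      rintro ⟨hb, -⟩
      rw [hb] at hgd
      exact hc.1 hgd
    have h2 : ¬ (s.getD i ' ' = q) := by
      intro hb
      rw [hb] at hgd
      exact hc.2 hgd
    rw [pvLoopA, dif_pos hin, if_neg h1, if_neg h2]
    exact ih (i + 1) j (by omega) (by omega) hj (fun k hk1 hk2 => h k (by omega) hk2)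

theorem pvFF_nonneg (s : List Char) (c : Char) (i : Nat) (hi : i ≤ s.length)
    (h : PySem.Chars.findFrom s [c] (i : Int) none ≠ -1) :
    0 ≤ PySem.Chars.findFrom s [c] (i : Int) none := by
  have := (PySem.Chars.findFrom_natCast_spec s [c] i hi h).1
  omega

theorem pvLoopAB_aux (s : List Char) (q : Char) :
    ∀ (d i : Nat), s.length - i = d → i ≤ s.length →
    pvLoopA s q i = min (pvLoopB s q i) s.length := by
  intro d
  induction d using Nat.strong_induction_on with
  | _ d ih =>
    intro i hd hi
    by_cases hin : i < s.length
    · have hle : i ≤ s.length := Nat.le_of_lt hin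
      by_cases hb : PySem.Chars.findFrom s ['\\'] (i : Int) none ≠ -1 ∧
          (PySem.Chars.findFrom s [q] (i : Int) none = -1 ∨
           PySem.Chars.findFrom s ['\\'] (i : Int) none ≤ PySem.Chars.findFrom s [q] (i : Int) none)
      · -- escape branch
        obtain ⟨hm0, hm1, hm2, hm3⟩ := pvFF_some s '\\' i hle hb.1
        have hbnn := pvFF_nonneg s '\\' i hle hb.1
        have hnq : ∀ k, i ≤ k → k < (PySem.Chars.findFrom s ['\\'] (i : Int) none).toNat →
            s[k]? ≠ some q := by
          rcases hb.2 with hq1 | hq2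
          · intro k h1 h2
            exact (pvFF_none s q i hle).mp hq1 k h1 (by omega)
          · have hqne : PySem.Chars.findFrom s [q] (i : Int) none ≠ -1 := by
              intro he; rw [he] at hq2; omega
            obtain ⟨-, -, -, q3⟩ := pvFF_some s q i hle hqne
            have hqnn := pvFF_nonneg s q i hle hqne
            intro k h1 h2
            exact q3 k h1 (by omega)
        have hgap := pvLoopA_gap s q ((PySem.Chars.findFrom s ['\\'] (i : Int) none).toNat - i) i
          (PySem.Chars.findFrom s ['\\'] (i : Int) none).toNat rfl hm0 (by omega)
          (fun k h1 h2 => ⟨hm3 k h1 h2, hnq k h1 h2⟩)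
        have hBstep : pvLoopB s q i
            = pvLoopB s q ((PySem.Chars.findFrom s ['\\'] (i : Int) none).toNat + 2) := by
          rw [pvLoopB, dif_pos hin, dif_pos hb]
        have hgdm := pvGetD_eq s (PySem.Chars.findFrom s ['\\'] (i : Int) none).toNat hm1
        have hcm : s.getD (PySem.Chars.findFrom s ['\\'] (i : Int) none).toNat ' ' = '\\' := by
          rw [hgdm] at hm2; exact (Option.some_inj.mp hm2)
        by_cases hnext : (PySem.Chars.findFrom s ['\\'] (i : Int) none).toNat + 1 < s.length
        · have hAstep : pvLoopA s q (PySem.Chars.findFrom s ['\\'] (i : Int) none).toNat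
              = pvLoopA s q ((PySem.Chars.findFrom s ['\\'] (i : Int) none).toNat + 2) := by
            rw [pvLoopA, dif_pos hm1, if_pos ⟨hcm, hnext⟩]
          rw [hgap, hAstep, hBstep]
          exact ih (s.length - ((PySem.Chars.findFrom s ['\\'] (i : Int) none).toNat + 2))
            (by omega) _ rfl (by omega)
        · -- backslash is the last character: both sides give s.length
          have hml : (PySem.Chars.findFrom s ['\\'] (i : Int) none).toNat + 1 = s.length := by omega
          have hAend : pvLoopA s q (PySem.Chars.findFrom s ['\\'] (i : Int) none).toNat = s.length := by
            rw [pvLoopA, dif_pos hm1, if_neg (by rintro ⟨-, h2⟩; omega)]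
            by_cases hqq : s.getD (PySem.Chars.findFrom s ['\\'] (i : Int) none).toNat ' ' = q
            · rw [if_pos hqq]; omega
            · rw [if_neg hqq, hml, pvLoopA, dif_neg (by omega)]
          have hBend : pvLoopB s q ((PySem.Chars.findFrom s ['\\'] (i : Int) none).toNat + 2)
              = (PySem.Chars.findFrom s ['\\'] (i : Int) none).toNat + 2 := by
            rw [pvLoopB, dif_neg (by omega)]
          rw [hgap, hAend, hBstep, hBend]
          omega
      · by_cases hq : PySem.Chars.findFrom s [q] (i : Int) none ≠ -1
        · -- closing quote branch
          obtain ⟨q0, q1, q2, q3⟩ := pvFF_some s q i hle hq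
          have hqnn := pvFF_nonneg s q i hle hq
          have hnb : ∀ k, i ≤ k → k ≤ (PySem.Chars.findFrom s [q] (i : Int) none).toNat →
              s[k]? ≠ some '\\' := by
            rcases (not_and_or.mp hb) with hb1 | hb2
            · intro k h1 h2
              have hbeq : PySem.Chars.findFrom s ['\\'] (i : Int) none = -1 := by
                by_contra hc; exact hb1 hc
              exact (pvFF_none s '\\' i hle).mp hbeq k h1 (by omega)
            · have hb2' : PySem.Chars.findFrom s [q] (i : Int) none ≠ -1 ∧
                  PySem.Chars.findFrom s [q] (i : Int) none
                    < PySem.Chars.findFrom s ['\\'] (i : Int) none := by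
                rcases (not_or.mp hb2) with ⟨hx, hy⟩
                exact ⟨hx, by omega⟩
              have hbne : PySem.Chars.findFrom s ['\\'] (i : Int) none ≠ -1 := by
                intro he; rw [he] at hb2'; omega
              obtain ⟨-, -, -, b3⟩ := pvFF_some s '\\' i hle hbne
              have hbnn := pvFF_nonneg s '\\' i hle hbne
              intro k h1 h2
              exact b3 k h1 (by omega)
          have hgap := pvLoopA_gap s q ((PySem.Chars.findFrom s [q] (i : Int) none).toNat - i) i
            (PySem.Chars.findFrom s [q] (i : Int) none).toNat rfl q0 (by omega)
            (fun k h1 h2 => ⟨hnb k h1 (by omega), q3 k h1 h2⟩)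
          have hgdm := pvGetD_eq s (PySem.Chars.findFrom s [q] (i : Int) none).toNat q1
          have hcm : s.getD (PySem.Chars.findFrom s [q] (i : Int) none).toNat ' ' = q := by
            rw [hgdm] at q2; exact (Option.some_inj.mp q2)
          have hnbm : s.getD (PySem.Chars.findFrom s [q] (i : Int) none).toNat ' ' ≠ '\\' := by
            intro hc
            rw [hc] at hgdm
            exact hnb _ q0 (le_refl _) hgdm
          have hA : pvLoopA s q (PySem.Chars.findFrom s [q] (i : Int) none).toNat
              = (PySem.Chars.findFrom s [q] (i : Int) none).toNat + 1 := by
            rw [pvLoopA, dif_pos q1, if_neg (by rintro ⟨h1, -⟩; exact hnbm h1), if_pos hcm]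
          have hB : pvLoopB s q i = (PySem.Chars.findFrom s [q] (i : Int) none).toNat + 1 := by
            rw [pvLoopB, dif_pos hin, dif_neg hb, if_pos hq]
          rw [hgap, hA, hB]
          omega
        · -- unterminated: neither backslash-first nor quote
          have hqeq : PySem.Chars.findFrom s [q] (i : Int) none = -1 := by
            by_contra hc; exact hq hc
          have hbeq : PySem.Chars.findFrom s ['\\'] (i : Int) none = -1 := by
            by_contra hc
            exact hb ⟨hc, Or.inl hqeq⟩
          have hgap := pvLoopA_gap s q (s.length - i) i s.length rfl hle (le_refl _)
            (fun k h1 h2 => ⟨(pvFF_none s '\\' i hle).mp hbeq k h1 h2,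
                             (pvFF_none s q i hle).mp hqeq k h1 h2⟩)
          have hA : pvLoopA s q s.length = s.length := by
            rw [pvLoopA, dif_neg (by omega)]
          have hB : pvLoopB s q i = s.length := by
            rw [pvLoopB, dif_pos hin, dif_neg hb, if_neg hq]
          rw [hgap, hA, hB]
          omega
    · have : i = s.length := by omega
      subst this
      rw [pvLoopA, dif_neg hin, pvLoopB, dif_neg hin]
      omega

theorem pvLoopAB (s : List Char) (q : Char) (i : Nat) (hi : i ≤ s.length) :
    pvLoopA s q i = min (pvLoopB s q i) s.length :=
  pvLoopAB_aux s q (s.length - i) i rfl hi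

-- ===== VERDICT (by name: the statement is the Claim_ definition above) =====
theorem append_quoted_literal_py_spec : Claim_equal_append_quoted_literal_py := by
  intro source start out_ _hdom hpre
  obtain ⟨h0, hlt⟩ := hpre
  unfold Spec_append_quoted_literal_py
  unfold append_quoted_literal_py append_quoted_literal_py_alt
  obtain ⟨k, rfl⟩ : ∃ k : Nat, start = (k : Int) := ⟨start.toNat, (Int.toNat_of_nonneg h0).symm⟩
  have hk : k < source.toList.length := by
    have h1 : source.length = source.toList.length := by
      simp
    omega
  have hget : PySem.Str.pyGet? source (k : Int) = some (source.toList.getD k ' ') := by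
    rw [PySem.Str.pyGet?_natCast, List.getElem?_eq_getElem hk]
    rw [List.getD_eq_getElem source.toList ' ' hk]
  rw [hget]
  simp only [Int.toNat_natCast]
  rw [pvLoopAB source.toList (source.toList.getD k ' ') (k + 1) (by omega)]
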